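-- pv_equiv track=rewrite | github.com/KeonhoPark/algorithmStudy | BJ2864.py | to_max
-- ===== SOURCE A (Python) =====
-- def to_max(n):
--     res = n
--     i = 0
--     while n > 0:
--         if n % 10 == 5:
--             res += 10 ** i
--         i += 1
--         n = n // 10
--
--     return res
-- ===== SOURCE B (Python) =====
-- def to_max(n):
--     if n <= 0:
--         return n
--     d = n % 10
--     return to_max(n // 10) * 10 + (6 if d == 5 else d)
-- ===== Notes on version B (the rewrite author's own statement) =====
-- stated objective: alternative
-- what changed: B rebuilds the number recursively digit by digit (replacing digit 5 with 6 as it reconstructs), instead of A's iterative loop that keeps the original n and adds 10**i corrections for each 5-digit.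
import Mathlib
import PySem

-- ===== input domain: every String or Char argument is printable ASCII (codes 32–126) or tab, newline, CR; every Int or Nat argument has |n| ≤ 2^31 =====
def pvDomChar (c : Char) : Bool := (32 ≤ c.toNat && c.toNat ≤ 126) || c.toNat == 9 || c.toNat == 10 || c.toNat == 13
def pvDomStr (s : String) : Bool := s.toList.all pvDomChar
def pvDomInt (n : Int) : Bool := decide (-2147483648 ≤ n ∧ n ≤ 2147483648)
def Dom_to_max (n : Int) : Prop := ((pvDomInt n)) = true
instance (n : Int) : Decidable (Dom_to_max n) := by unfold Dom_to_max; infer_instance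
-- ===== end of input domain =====

-- B rebuilds the number recursively digit by digit; A keeps n and adds 10^i corrections in a loop.

-- ===== PORT A =====
-- A's while loop: state (res, i, n); 'res += 10 ** i' when n % 10 == 5, then i += 1, n //= 10.
def toMaxLoop (res : Int) (i : Nat) (n : Int) : Int :=
  if h : 0 < n then
    toMaxLoop (if PySem.Int.mod n 10 == 5 then res + 10 ^ i else res) (i + 1)
      (PySem.Int.floordiv n 10)
  else res
termination_by n.toNat
decreasing_by
  have h10 : PySem.Int.floordiv n 10 = n / 10 := PySem.Int.floordiv_eq_ediv_of_pos (by omega)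
  rw [h10]; omega

def to_max (n : Int) : Int := toMaxLoop n 0 n

-- ===== PORT B =====
def to_max_alt (n : Int) : Int :=
  if h : n ≤ 0 then n
  else
    let d := PySem.Int.mod n 10
    to_max_alt (PySem.Int.floordiv n 10) * 10 + (if d == 5 then 6 else d)
termination_by n.toNat
decreasing_by
  have h10 : PySem.Int.floordiv n 10 = n / 10 := PySem.Int.floordiv_eq_ediv_of_pos (by omega)
  rw [h10]; omega

-- ===== PRECONDITION & SPEC =====
def Spec_to_max (n : Int) (out : Int) : Prop := out = to_max_alt n
instance (n : Int) (out : Int) : Decidable (Spec_to_max n out) := by unfold Spec_to_max; infer_instance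

-- ===== CLAIM (what is proved, stated in full; the proofs are below) =====
def Claim_equal_to_max : Prop := ∀ (n : Int), Dom_to_max n → Spec_to_max n (to_max n)

-- ===== LEMMAS AND PROOFS =====

-- Loop invariant: running A's loop from state (res, i, n) adds (to_max_alt n − n) · 10^i to res.
theorem toMaxLoop_eq (n : Int) :
    ∀ (res : Int) (i : Nat), toMaxLoop res i n = res + (to_max_alt n - n) * 10 ^ i := by
  induction n using to_max_alt.induct with
  | case1 n hn =>
    intro res i
    rw [toMaxLoop, to_max_alt]
    simp [hn, not_lt.mpr hn]
  | case2 n hn ih =>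
    intro res i
    have hpos : 0 < n := lt_of_not_ge hn
    have hfd : PySem.Int.floordiv n 10 = n / 10 := PySem.Int.floordiv_eq_ediv_of_pos (by omega)
    have hmd : PySem.Int.mod n 10 = n % 10 := PySem.Int.mod_eq_emod_of_pos (by omega)
    have hrec : n = n / 10 * 10 + n % 10 := by omega
    rw [toMaxLoop, to_max_alt]
    simp only [dif_neg hn, dif_pos hpos]
    rw [ih]
    simp only [hfd, hmd, beq_iff_eq]
    by_cases h5 : n % 10 = 5
    · rw [h5] at hrec
      simp only [h5, if_pos]
      linear_combination (10:Int) ^ i * hrec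
    · rw [if_neg h5, if_neg h5]
      linear_combination (10:Int) ^ i * hrec

-- ===== VERDICT (by name: the statement is the Claim_ definition above) =====
theorem to_max_spec : Claim_equal_to_max := by
  intro n _
  unfold Spec_to_max to_max
  rw [toMaxLoop_eq]
  ring
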